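-- pv_equiv track=rewrite | github.com/Anton554/Find_conturs | pdf_test.py | real_num
-- ===== SOURCE A (Python) =====
-- def real_num(dc: dict):
--     """Присваивает варианту настоящий порядковый номер
--     Принимает словарь с ошибочными порядковыми номерами.
--     Возвращает словарь с правильными порядковыми номерами.
--
--     :param dc: Словарь типа {ложный номер: [x1, y1, x2, y2]}
--     :return: Словарь типа {порядковый номер: [x1, y1, x2, y2]}
--     """
--     ls_left = []
--     ls_right = []
--     ls_fin = []
--     dc_fin = {}
--     for el in dc.values():
--         if el[0] < 300:
--             ls_left.append(el)
--         else:
--             ls_right.append(el)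
--
--     ls_left = sorted(ls_left, key=lambda x: x[1])
--     ls_right = sorted(ls_right, key=lambda x: x[1])
--     ls_fin.extend(ls_left)
--     ls_fin.extend(ls_right)
--     for n in range(len(ls_fin)):
--         dc_fin[n + 1] = ls_fin[n]
--     return dc_fin
-- ===== SOURCE B (Python) =====
-- def real_num(dc: dict):
--     order = sorted(dc.values(), key=lambda el: (0 if el[0] < 300 else 1, el[1]))
--     return dict(enumerate(order, start=1))
-- ===== Notes on version B (the rewrite author's own statement) =====
-- stated objective: simpler
-- what changed: Replaces the explicit left/right bucket partition, two separate sorts and two extends plus an index renumbering loop by a single stable sort with a composite (bucket, y) key and dict(enumerate(..., 1)).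
import Mathlib
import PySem

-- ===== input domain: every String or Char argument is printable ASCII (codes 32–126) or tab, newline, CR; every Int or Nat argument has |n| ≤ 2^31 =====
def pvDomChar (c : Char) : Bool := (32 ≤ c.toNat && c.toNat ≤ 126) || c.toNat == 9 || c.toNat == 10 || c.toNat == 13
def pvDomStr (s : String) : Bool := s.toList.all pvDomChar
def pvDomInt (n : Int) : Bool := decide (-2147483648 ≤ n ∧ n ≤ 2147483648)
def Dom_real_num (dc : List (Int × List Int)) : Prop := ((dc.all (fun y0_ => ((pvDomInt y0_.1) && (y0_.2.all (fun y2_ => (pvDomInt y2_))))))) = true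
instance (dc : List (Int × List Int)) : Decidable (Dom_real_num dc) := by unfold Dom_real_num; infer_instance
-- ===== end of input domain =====

-- B replaces A's explicit left/right bucket partition + two sorts + two extends + index loop
-- by one stable sort on the composite key (bucket, y) and dict(enumerate(..., 1)) (objective: simpler).

-- ===== PORT A =====
def real_num (dc : List (Int × List Int)) : List (Int × List Int) :=
  let vals := (PySem.Dict.ofList dc).values
  -- the partition loop: ls_left / ls_right built by append
  let lr := vals.foldl (fun (s : List (List Int) × List (List Int)) el =>
      if PySem.List.pyGetD el 0 0 < 300 then (s.1 ++ [el], s.2) else (s.1, s.2 ++ [el])) ([], [])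
  -- ls_fin = sorted(ls_left, key y) ++ sorted(ls_right, key y)
  let ls_fin := PySem.List.sorted lr.1 (fun x => PySem.List.pyGetD x 1 0) false
             ++ PySem.List.sorted lr.2 (fun x => PySem.List.pyGetD x 1 0) false
  -- the renumbering loop: for n in range(len(ls_fin)): dc_fin[n+1] = ls_fin[n]
  ((PySem.List.pyRange 0 (PySem.List.len ls_fin) 1).foldl
      (fun d n => d.insert (n + 1) (PySem.List.pyGetD ls_fin n ([] : List Int)))
      (PySem.Dict.empty : PySem.Dict Int (List Int))).items

-- ===== PORT B =====
def real_num_alt (dc : List (Int × List Int)) : List (Int × List Int) :=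
  let order := PySem.List.sorted2 (PySem.Dict.ofList dc).values
      (fun el => if PySem.List.pyGetD el 0 0 < 300 then (0 : Int) else 1)
      (fun el => PySem.List.pyGetD el 1 0) false
  (PySem.Dict.ofList (PySem.List.enumerate order 1)).items

-- ===== PRECONDITION & SPEC =====
-- Pre_ excludes inputs on which the Python A raises IndexError: a dict value shorter than 2
-- (A reads el[0] and the sort key reads el[1]).
def Pre_real_num (dc : List (Int × List Int)) : Prop :=
  ((PySem.Dict.ofList dc).values.all (fun v => decide (2 ≤ v.length))) = true
instance (dc : List (Int × List Int)) : Decidable (Pre_real_num dc) := by unfold Pre_real_num; infer_instance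
def pvWitness_real_num : (List (Int × List Int)) := [(5, [10, 2]), (2, [400, 1]), (9, [10, 1])]
def Spec_real_num (dc : List (Int × List Int)) (out : List (Int × List Int)) : Prop := out = real_num_alt dc
instance (dc : List (Int × List Int)) (out : List (Int × List Int)) : Decidable (Spec_real_num dc out) := by unfold Spec_real_num; infer_instance

-- ===== CLAIM (what is proved, stated in full; the proofs are below) =====
def Claim_equal_real_num : Prop := ∀ (dc : List (Int × List Int)), Dom_real_num dc → Pre_real_num dc → Spec_real_num dc (real_num dc)

-- ===== LEMMAS AND PROOFS =====

-- x is inserted no later than the start of R when it comes before everything in R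
theorem insertBy_append_all_before {α : Type} (before : α → α → Bool) (x : α) (L R : List α)
    (h : ∀ y ∈ R, before x y = true) :
    PySem.List.insertBy before x (L ++ R) = PySem.List.insertBy before x L ++ R := by
  induction L with
  | nil =>
    cases R with
    | nil => rfl
    | cons r rs => simp [PySem.List.insertBy, h r (by simp)]
  | cons y L' ih =>
    simp only [List.cons_append, PySem.List.insertBy]
    by_cases hb : before x y = true
    · simp [hb]
    · simp only [Bool.not_eq_true] at hb
      simp [hb, ih]

-- x passes over all of L when it comes before nothing in L
theorem insertBy_append_none_before {α : Type} (before : α → α → Bool) (x : α) (L R : List α)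
    (h : ∀ y ∈ L, before x y = false) :
    PySem.List.insertBy before x (L ++ R) = L ++ PySem.List.insertBy before x R := by
  induction L with
  | nil => rfl
  | cons y L' ih =>
    have hy := h y (by simp)
    simp only [List.cons_append, PySem.List.insertBy, hy]
    simp only [Bool.false_eq_true, if_false, List.cons.injEq, true_and]
    exact ih (fun z hz => h z (by simp [hz]))

-- insertBy only looks at 'before x ·' on members of the list
theorem insertBy_congr_mem {α : Type} (before before' : α → α → Bool) (x : α) (L : List α)
    (h : ∀ y ∈ L, before x y = before' x y) :
    PySem.List.insertBy before x L = PySem.List.insertBy before' x L := by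
  induction L with
  | nil => rfl
  | cons y L' ih =>
    have hy := h y (by simp)
    simp only [PySem.List.insertBy, hy]
    by_cases hb : before' x y = true
    · simp [hb]
    · simp only [Bool.not_eq_true] at hb
      simp [hb]
      exact ih (fun z hz => h z (by simp [hz]))

-- A's partition loop computes (filter p, filter !p)
theorem partition_loop (vals : List (List Int)) :
    vals.foldl (fun (s : List (List Int) × List (List Int)) el =>
        if PySem.List.pyGetD el 0 0 < 300 then (s.1 ++ [el], s.2) else (s.1, s.2 ++ [el])) ([], [])
      = (vals.filter (fun el => decide (PySem.List.pyGetD el 0 0 < 300)),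
         vals.filter (fun el => !decide (PySem.List.pyGetD el 0 0 < 300))) := by
  have hcongr : vals.foldl (fun (s : List (List Int) × List (List Int)) el =>
        if PySem.List.pyGetD el 0 0 < 300 then (s.1 ++ [el], s.2) else (s.1, s.2 ++ [el])) ([], [])
      = vals.foldl (fun (s : List (List Int) × List (List Int)) el =>
        ((if decide (PySem.List.pyGetD el 0 0 < 300) then s.1 ++ [el] else s.1),
         (if !decide (PySem.List.pyGetD el 0 0 < 300) then s.2 ++ [el] else s.2))) ([], []) := by
    apply PySem.List.foldl_congr_mem
    intro acc x _
    by_cases h : PySem.List.pyGetD x 0 0 < 300 <;> simp [h]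
  rw [hcongr,
    PySem.List.foldl_prod_mk
      (f := fun (a : List (List Int)) el => if decide (PySem.List.pyGetD el 0 0 < 300) then a ++ [el] else a)
      (g := fun (b : List (List Int)) el => if !decide (PySem.List.pyGetD el 0 0 < 300) then b ++ [el] else b),
    PySem.List.foldl_append_if_eq_filter, PySem.List.foldl_append_if_eq_filter]
  simp

-- the composite-key stable sort is the concatenation of the two per-bucket stable sorts
theorem sorted2_eq_append (vals : List (List Int)) :
    PySem.List.sorted2 vals
        (fun el => if PySem.List.pyGetD el 0 0 < 300 then (0 : Int) else 1)
        (fun el => PySem.List.pyGetD el 1 0) false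
      = PySem.List.sorted (vals.filter (fun el => decide (PySem.List.pyGetD el 0 0 < 300)))
          (fun x => PySem.List.pyGetD x 1 0) false
        ++ PySem.List.sorted (vals.filter (fun el => !decide (PySem.List.pyGetD el 0 0 < 300)))
            (fun x => PySem.List.pyGetD x 1 0) false := by
  induction vals using List.reverseRecOn with
  | nil => rfl
  | append_singleton vs x ih =>
    have hg : ∀ (a b : List Int), (fun a b =>
          decide ((if PySem.List.pyGetD a 0 0 < 300 then (0:Int) else 1) < (if PySem.List.pyGetD b 0 0 < 300 then (0:Int) else 1))
          || (!decide ((if PySem.List.pyGetD b 0 0 < 300 then (0:Int) else 1) < (if PySem.List.pyGetD a 0 0 < 300 then (0:Int) else 1))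
              && decide (PySem.List.pyGetD a 1 0 < PySem.List.pyGetD b 1 0))) a b
        = (fun a b =>
          decide ((if PySem.List.pyGetD a 0 0 < 300 then (0:Int) else 1) < (if PySem.List.pyGetD b 0 0 < 300 then (0:Int) else 1))
          || (!decide ((if PySem.List.pyGetD b 0 0 < 300 then (0:Int) else 1) < (if PySem.List.pyGetD a 0 0 < 300 then (0:Int) else 1))
              && decide (PySem.List.pyGetD a 1 0 < PySem.List.pyGetD b 1 0))) a b := fun _ _ => rfl
    -- name the three orderings
    set lex : List Int → List Int → Bool := fun a b =>
        decide ((if PySem.List.pyGetD a 0 0 < 300 then (0:Int) else 1) < (if PySem.List.pyGetD b 0 0 < 300 then (0:Int) else 1))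
        || (!decide ((if PySem.List.pyGetD b 0 0 < 300 then (0:Int) else 1) < (if PySem.List.pyGetD a 0 0 < 300 then (0:Int) else 1))
            && decide (PySem.List.pyGetD a 1 0 < PySem.List.pyGetD b 1 0)) with hlex
    set bk : List Int → List Int → Bool := fun a b =>
        decide (PySem.List.pyGetD a 1 0 < PySem.List.pyGetD b 1 0) with hbk
    have unf2 : ∀ (l : List (List Int)), PySem.List.sorted2 l
        (fun el => if PySem.List.pyGetD el 0 0 < 300 then (0 : Int) else 1)
        (fun el => PySem.List.pyGetD el 1 0) false
        = l.foldl (fun acc x => PySem.List.insertBy lex x acc) [] := fun _ => rfl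
    have unf1 : ∀ (l : List (List Int)), PySem.List.sorted l (fun x => PySem.List.pyGetD x 1 0) false
        = l.foldl (fun acc x => PySem.List.insertBy bk x acc) [] := fun _ => rfl
    rw [unf2, List.foldl_append, ← unf2, ih]
    simp only [List.foldl_cons, List.foldl_nil, List.filter_append]
    set L := PySem.List.sorted (vs.filter (fun el => decide (PySem.List.pyGetD el 0 0 < 300)))
        (fun x => PySem.List.pyGetD x 1 0) false with hL
    set R := PySem.List.sorted (vs.filter (fun el => !decide (PySem.List.pyGetD el 0 0 < 300)))
        (fun x => PySem.List.pyGetD x 1 0) false with hR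
    have hLmem : ∀ y ∈ L, PySem.List.pyGetD y 0 0 < 300 := by
      intro y hy
      rw [hL, PySem.List.mem_sorted] at hy
      simpa using (List.of_mem_filter hy)
    have hRmem : ∀ y ∈ R, ¬ (PySem.List.pyGetD y 0 0 < 300) := by
      intro y hy
      rw [hR, PySem.List.mem_sorted] at hy
      simpa using (List.of_mem_filter hy)
    by_cases hx : PySem.List.pyGetD x 0 0 < 300
    · -- x goes to the left bucket
      have h1 : PySem.List.insertBy lex x (L ++ R) = PySem.List.insertBy lex x L ++ R := by
        apply insertBy_append_all_before
        intro y hy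
        have := hRmem y hy
        simp [hlex, hx, this]
      have h2 : PySem.List.insertBy lex x L = PySem.List.insertBy bk x L := by
        apply insertBy_congr_mem
        intro y hy
        have := hLmem y hy
        simp [hlex, hbk, hx, this]
      rw [h1, h2]
      simp only [hx, decide_true, Bool.not_true, List.filter_cons, List.filter_nil]
      simp only [if_true, Bool.false_eq_true, if_false, List.append_nil]
      rw [unf1, List.foldl_append, ← unf1, ← hL]
      rfl
    · -- x goes to the right bucket
      have h1 : PySem.List.insertBy lex x (L ++ R) = L ++ PySem.List.insertBy lex x R := by
        apply insertBy_append_none_before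
        intro y hy
        have := hLmem y hy
        simp [hlex, hx, this]
      have h2 : PySem.List.insertBy lex x R = PySem.List.insertBy bk x R := by
        apply insertBy_congr_mem
        intro y hy
        have := hRmem y hy
        simp [hlex, hbk, hx, this]
      rw [h1, h2]
      simp only [hx, decide_false, Bool.not_false, List.filter_cons, List.filter_nil]
      simp only [Bool.false_eq_true, if_false, if_true, List.append_nil]
      rw [unf1 ((vs.filter _) ++ [x]), List.foldl_append, ← unf1, ← hR]
      rfl

-- folding insert over pairs with fresh pairwise-distinct keys just appends the pairs
theorem items_foldl_insert_fresh (ps : List (Int × List Int)) :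
    ∀ (d : PySem.Dict Int (List Int)),
    (ps.map (·.1)).Nodup → (∀ q ∈ d.items, q.1 ∉ ps.map (·.1)) →
    (ps.foldl (fun d p => d.insert p.1 p.2) d).items = d.items ++ ps := by
  induction ps with
  | nil => intro d _ _; simp
  | cons kv ps ih =>
    intro d hnd hd
    have hfresh : d.contains kv.1 = false := by
      simp only [PySem.Dict.contains, List.any_eq_false]
      intro q hq
      have := hd q hq
      simp only [List.map_cons, List.mem_cons] at this
      rw [not_or] at this
      simpa using this.1
    simp only [List.foldl_cons]
    have hins : (d.insert kv.1 kv.2).items = d.items ++ [(kv.1, kv.2)] := by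
      simp [PySem.Dict.insert, hfresh]
    rw [ih (d.insert kv.1 kv.2) (by simpa using hnd.of_cons) ?_]
    · rw [hins]; simp
    · intro q hq
      rw [hins] at hq
      rcases List.mem_append.mp hq with h | h
      · have := hd q h
        simp only [List.map_cons, List.mem_cons] at this
        rw [not_or] at this
        exact this.2
      · simp only [List.mem_singleton] at h
        subst h
        simp only [List.map_cons, List.nodup_cons] at hnd
        exact hnd.1

theorem enumerate_keys_nodup (xs : List (List Int)) (s : Int) :
    ((PySem.List.enumerate xs s).map (·.1)).Nodup := by
  rw [PySem.List.map_fst_enumerate]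
  exact PySem.List.nodup_pyRange_one s (s + xs.length)

-- shifting the start of enumerate
theorem enumerate_shift (xs : List (List Int)) :
    ∀ (s : Int), PySem.List.enumerate xs (s + 1)
      = (PySem.List.enumerate xs s).map (fun q => (q.1 + 1, q.2)) := by
  induction xs with
  | nil => intro s; simp [PySem.List.enumerate_nil]
  | cons x t ih => intro s; simp [PySem.List.enumerate_cons, ih (s + 1)]

-- A's renumbering loop produces exactly enumerate(fin, 1) as the dict's items
theorem dict_loop_eq_enumerate (fin : List (List Int)) :
    ((PySem.List.pyRange 0 (PySem.List.len fin) 1).foldl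
        (fun d n => d.insert (n + 1) (PySem.List.pyGetD fin n ([] : List Int)))
        (PySem.Dict.empty : PySem.Dict Int (List Int))).items
      = PySem.List.enumerate fin 1 := by
  have hmap : PySem.List.enumerate fin 0
      = (PySem.List.pyRange 0 (PySem.List.len fin) 1).map
          (fun j => (j, PySem.List.pyGetD fin j ([] : List Int))) := by
    simpa [PySem.List.len] using PySem.List.enumerate_eq_map_pyRange (xs := fin) ([] : List Int)
  have h1 : ((PySem.List.pyRange 0 (PySem.List.len fin) 1).foldl
        (fun d n => d.insert (n + 1) (PySem.List.pyGetD fin n ([] : List Int)))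
        (PySem.Dict.empty : PySem.Dict Int (List Int)))
      = (PySem.List.enumerate fin 1).foldl (fun d p => d.insert p.1 p.2)
        (PySem.Dict.empty : PySem.Dict Int (List Int)) := by
    have hsh : PySem.List.enumerate fin 1
        = (PySem.List.enumerate fin 0).map (fun q => (q.1 + 1, q.2)) := by
      simpa using enumerate_shift fin 0
    rw [hsh, hmap, List.foldl_map, List.foldl_map]
  rw [h1, items_foldl_insert_fresh _ _ (enumerate_keys_nodup fin 1) (by simp [PySem.Dict.empty])]
  simp [PySem.Dict.empty]

-- B's dict(enumerate(order, 1)) has exactly enumerate(order, 1) as items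
theorem dict_ofList_enumerate (fin : List (List Int)) :
    (PySem.Dict.ofList (PySem.List.enumerate fin 1)).items = PySem.List.enumerate fin 1 := by
  show ((PySem.List.enumerate fin 1).foldl (fun d p => d.insert p.1 p.2)
      (PySem.Dict.empty : PySem.Dict Int (List Int))).items = _
  rw [items_foldl_insert_fresh _ _ (enumerate_keys_nodup fin 1) (by simp [PySem.Dict.empty])]
  simp [PySem.Dict.empty]

-- ===== VERDICT (by name: the statement is the Claim_ definition above) =====
theorem real_num_spec : Claim_equal_real_num := by
  intro dc _ _
  unfold Spec_real_num real_num real_num_alt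
  simp only [partition_loop, sorted2_eq_append, dict_loop_eq_enumerate, dict_ofList_enumerate]
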